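-- pv_equiv track=rewrite | github.com/emorynlp/TranscriptSynth | src/talign.py | target_to_align4d
-- ===== SOURCE A (Python) =====
-- def target_to_align4d(t_utterances: list[list[str]], a_tokens: list[str]) -> list[list[int]]:
--     maps, idx = [], 0
--     for utterance in t_utterances:
--         indices = []
--         for token in utterance:
--             for i in range(idx, len(a_tokens)):
--                 if token == a_tokens[i]:
--                     indices.append(i)
--                     idx = i + 1
--                     break
--             else:
--                 indices.append(-1)
--         maps.append(indices)
--     return maps
-- ===== SOURCE B (Python) =====
-- def target_to_align4d(t_utterances: list[list[str]], a_tokens: list[str]) -> list[list[int]]: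
--     # Index each token's positions once, then binary-search the first position >= idx.
--     pos = {}
--     for i, tok in enumerate(a_tokens):
--         pos.setdefault(tok, []).append(i)
--     maps, idx = [], 0
--     for utterance in t_utterances:
--         indices = []
--         for token in utterance:
--             lst = pos.get(token, [])
--             lo, hi = 0, len(lst)
--             while lo < hi:  # lower bound: first element of lst that is >= idx
--                 mid = (lo + hi) // 2
--                 if lst[mid] < idx:
--                     lo = mid + 1
--                 else:
--                     hi = mid
--             if lo == len(lst):
--                 indices.append(-1)
--             else:
--                 indices.append(lst[lo])
--                 idx = lst[lo] + 1
--         maps.append(indices)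
--     return maps
-- ===== Notes on version B (the rewrite author's own statement) =====
-- stated objective: alternative
-- what changed: Instead of rescanning a_tokens from idx for every utterance token, B builds a token->sorted-positions index once and binary-searches each token's position list for the first position >= idx (worst-case O(M + N log M) vs A's O(N*M), but not measurably faster on the generated inputs).
import Mathlib
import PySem

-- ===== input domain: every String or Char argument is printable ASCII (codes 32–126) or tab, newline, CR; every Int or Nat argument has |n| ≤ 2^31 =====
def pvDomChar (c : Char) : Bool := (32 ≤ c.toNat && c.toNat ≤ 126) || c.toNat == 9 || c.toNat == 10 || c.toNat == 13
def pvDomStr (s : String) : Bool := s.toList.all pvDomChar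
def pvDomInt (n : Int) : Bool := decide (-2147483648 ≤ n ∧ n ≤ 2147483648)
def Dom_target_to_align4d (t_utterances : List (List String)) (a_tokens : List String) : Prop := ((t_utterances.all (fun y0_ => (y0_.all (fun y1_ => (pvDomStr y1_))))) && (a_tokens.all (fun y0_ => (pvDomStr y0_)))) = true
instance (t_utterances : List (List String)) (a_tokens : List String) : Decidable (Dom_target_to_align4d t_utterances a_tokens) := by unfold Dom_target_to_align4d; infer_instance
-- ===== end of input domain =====

-- B replaces A's forward rescans of a_tokens by a token->positions index built once plus a
-- hand-written lower-bound binary search per utterance token (objective: alternative).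

-- ===== PORT A =====
-- A's inner 'for i in range(idx, len(a_tokens)): … break / else' loop,
-- as structural recursion over the remaining suffix a_tokens[i:] with i the running index
def scanA (tok : String) : List String → Nat → Option Nat
  | [], _ => none
  | x :: xs, i => if x = tok then some i else scanA tok xs (i + 1)

-- A's 'for token in utterance' loop: returns (indices, updated idx)
def uttA (a : List String) : List String → Nat → List Int × Nat
  | [], idx => ([], idx)
  | t :: ts, idx =>
    match scanA t (a.drop idx) idx with
    | some i => let r := uttA a ts (i + 1); ((i : Int) :: r.1, r.2)
    | none   => let r := uttA a ts idx; ((-1 : Int) :: r.1, r.2)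

-- A's outer 'for utterance in t_utterances' loop
def mapsA (a : List String) : List (List String) → Nat → List (List Int)
  | [], _ => []
  | u :: us, idx => let r := uttA a u idx; r.1 :: mapsA a us r.2

def target_to_align4d (t_utterances : List (List String)) (a_tokens : List String) : List (List Int) :=
  mapsA a_tokens t_utterances 0

-- ===== PORT B =====
-- B's 'for i, tok in enumerate(a_tokens): pos.setdefault(tok, []).append(i)' loop
def buildPos : List String → Nat → PySem.Dict String (List Nat) → PySem.Dict String (List Nat)
  | [], _, d => d
  | t :: ts, i, d => buildPos ts (i + 1) (d.insert t (d.getD t [] ++ [i]))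

-- B's hand-written lower-bound 'while lo < hi' loop ((lo+hi)//2 = Nat division: both
-- nonneg); fuel = an upper bound on the remaining interval size, only to make it structural
def lowB (lst : List Nat) (idx : Nat) : Nat → Nat → Nat → Nat
  | 0, lo, _ => lo
  | fuel + 1, lo, hi =>
    if lo < hi then
      if lst.getD ((lo + hi) / 2) 0 < idx then lowB lst idx fuel ((lo + hi) / 2 + 1) hi
      else lowB lst idx fuel lo ((lo + hi) / 2)
    else lo

-- B's 'for token in utterance' loop
def uttB (d : PySem.Dict String (List Nat)) : List String → Nat → List Int × Nat
  | [], idx => ([], idx)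
  | t :: ts, idx =>
    let lst := d.getD t []
    let lo := lowB lst idx lst.length 0 lst.length
    if lo = lst.length then
      let r := uttB d ts idx; ((-1 : Int) :: r.1, r.2)
    else
      let p := lst.getD lo 0
      let r := uttB d ts (p + 1); ((p : Int) :: r.1, r.2)

-- B's outer loop
def mapsB (d : PySem.Dict String (List Nat)) : List (List String) → Nat → List (List Int)
  | [], _ => []
  | u :: us, idx => let r := uttB d u idx; r.1 :: mapsB d us r.2

def target_to_align4d_alt (t_utterances : List (List String)) (a_tokens : List String) : List (List Int) :=
  mapsB (buildPos a_tokens 0 PySem.Dict.empty) t_utterances 0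

-- ===== PRECONDITION & SPEC =====
def Spec_target_to_align4d (t_utterances : List (List String)) (a_tokens : List String) (out : List (List Int)) : Prop := out = target_to_align4d_alt t_utterances a_tokens
instance (t_utterances : List (List String)) (a_tokens : List String) (out : List (List Int)) : Decidable (Spec_target_to_align4d t_utterances a_tokens out) := by unfold Spec_target_to_align4d; infer_instance

-- ===== CLAIM (what is proved, stated in full; the proofs are below) =====
def Claim_equal_target_to_align4d : Prop := ∀ (t_utterances : List (List String)) (a_tokens : List String), Dom_target_to_align4d t_utterances a_tokens → Spec_target_to_align4d t_utterances a_tokens (target_to_align4d t_utterances a_tokens)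

-- ===== LEMMAS AND PROOFS =====

-- specification list: the positions (offset by k) at which tok occurs in a
def posFrom : List String → String → Nat → List Nat
  | [], _, _ => []
  | x :: xs, tok, k => if x = tok then k :: posFrom xs tok (k + 1) else posFrom xs tok (k + 1)

lemma getD_buildPos (tok : String) : ∀ (a : List String) (i : Nat) (d : PySem.Dict String (List Nat)),
    (buildPos a i d).getD tok [] = d.getD tok [] ++ posFrom a tok i := by
  intro a
  induction a with
  | nil => intro i d; simp [buildPos, posFrom]
  | cons x xs ih =>
    intro i d
    simp only [buildPos, posFrom]
    rw [ih, PySem.Dict.getD_insert]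
    by_cases hx : x = tok
    · subst hx; simp
    · simp [hx, Ne.symm hx]

lemma mem_posFrom (tok : String) : ∀ (a : List String) (k j : Nat),
    j ∈ posFrom a tok k ↔ ∃ m, m < a.length ∧ j = k + m ∧ a.getD m "" = tok := by
  intro a
  induction a with
  | nil => intro k j; simp [posFrom]
  | cons x xs ih =>
    intro k j
    simp only [posFrom]
    constructor
    · intro h
      by_cases hx : x = tok
      · simp only [if_pos hx, List.mem_cons] at h
        rcases h with h | h
        · exact ⟨0, by simp, by omega, by simpa using hx⟩
        · rcases (ih (k + 1) j).1 h with ⟨m, hm, hj, hg⟩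
          exact ⟨m + 1, by simpa using hm, by omega, by simpa using hg⟩
      · rw [if_neg hx] at h
        rcases (ih (k + 1) j).1 h with ⟨m, hm, hj, hg⟩
        exact ⟨m + 1, by simpa using hm, by omega, by simpa using hg⟩
    · rintro ⟨m, hm, hj, hg⟩
      cases m with
      | zero =>
        simp only [List.getD_cons_zero] at hg
        simp [if_pos hg, hj]
      | succ m' =>
        simp only [List.getD_cons_succ] at hg
        have : j ∈ posFrom xs tok (k + 1) :=
          (ih (k + 1) j).2 ⟨m', by simpa using hm, by omega, hg⟩
        by_cases hx : x = tok <;> simp [hx, this]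

lemma posFrom_sorted (tok : String) : ∀ (a : List String) (k : Nat),
    (posFrom a tok k).Pairwise (· < ·) := by
  intro a
  induction a with
  | nil => intro k; simp [posFrom]
  | cons x xs ih =>
    intro k
    simp only [posFrom]
    by_cases hx : x = tok
    · rw [if_pos hx]
      refine List.pairwise_cons.2 ⟨?_, ih (k + 1)⟩
      intro j hj
      rcases (mem_posFrom tok xs (k + 1) j).1 hj with ⟨m, _, hj', _⟩
      omega
    · rw [if_neg hx]; exact ih (k + 1)

lemma scanA_some (tok : String) (a : List String) : ∀ (rest : List String) (i r : Nat),
    rest = a.drop i → scanA tok rest i = some r →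
    i ≤ r ∧ r < a.length ∧ a.getD r "" = tok ∧ ∀ j, i ≤ j → j < r → a.getD j "" ≠ tok := by
  intro rest
  induction rest with
  | nil => intro i r _ h; simp [scanA] at h
  | cons x xs ih =>
    intro i r hdrop h
    have hi : i < a.length := by
      by_contra hge
      rw [List.drop_eq_nil_of_le (by omega)] at hdrop
      simp at hdrop
    have hcons := List.drop_eq_getElem_cons hi
    rw [← hdrop] at hcons
    injection hcons with hx hxs
    simp only [scanA] at h
    by_cases hx2 : x = tok
    · rw [if_pos hx2] at h
      injection h with hr
      subst hr
      exact ⟨le_rfl, hi, by rw [List.getD_eq_getElem a "" hi, ← hx, hx2], by omega⟩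
    · rw [if_neg hx2] at h
      rcases ih (i + 1) r hxs h with ⟨h1, h2, h3, h4⟩
      refine ⟨by omega, h2, h3, ?_⟩
      intro j hj1 hj2
      rcases Nat.eq_or_lt_of_le hj1 with rfl | hlt
      · rw [List.getD_eq_getElem a "" hi, ← hx]; exact hx2
      · exact h4 j hlt hj2

lemma scanA_none (tok : String) (a : List String) : ∀ (rest : List String) (i : Nat),
    rest = a.drop i → scanA tok rest i = none →
    ∀ j, i ≤ j → j < a.length → a.getD j "" ≠ tok := by
  intro rest
  induction rest with
  | nil =>
    intro i hdrop _ j hj1 hj2 _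
    have : a.length ≤ i := List.drop_eq_nil_iff.1 hdrop.symm
    omega
  | cons x xs ih =>
    intro i hdrop h
    have hi : i < a.length := by
      by_contra hge
      rw [List.drop_eq_nil_of_le (by omega)] at hdrop
      simp at hdrop
    have hcons := List.drop_eq_getElem_cons hi
    rw [← hdrop] at hcons
    injection hcons with hx hxs
    simp only [scanA] at h
    by_cases hx2 : x = tok
    · rw [if_pos hx2] at h; simp at h
    · rw [if_neg hx2] at h
      intro j hj1 hj2
      rcases Nat.eq_or_lt_of_le hj1 with rfl | hlt
      · rw [List.getD_eq_getElem a "" hi, ← hx]; exact hx2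
      · exact ih (i + 1) hxs h j hlt hj2

lemma lowB_spec (lst : List Nat) (idx : Nat)
    (hs : ∀ p q, p < q → q < lst.length → lst.getD p 0 < lst.getD q 0) :
    ∀ fuel lo hi, hi - lo ≤ fuel → lo ≤ hi → hi ≤ lst.length →
      (∀ j, j < lo → lst.getD j 0 < idx) →
      (∀ j, hi ≤ j → j < lst.length → idx ≤ lst.getD j 0) →
      (∀ j, j < lowB lst idx fuel lo hi → lst.getD j 0 < idx) ∧
      (∀ j, lowB lst idx fuel lo hi ≤ j → j < lst.length → idx ≤ lst.getD j 0) ∧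
      lowB lst idx fuel lo hi ≤ lst.length := by
  intro fuel
  induction fuel with
  | zero =>
    intro lo hi hf hle hhi p1 p2
    simp only [lowB]
    exact ⟨p1, fun j hj hjl => p2 j (by omega) hjl, by omega⟩
  | succ f ih =>
    intro lo hi hf hle hhi p1 p2
    simp only [lowB]
    by_cases h : lo < hi
    · rw [if_pos h]
      by_cases hc : lst.getD ((lo + hi) / 2) 0 < idx
      · rw [if_pos hc]
        refine ih ((lo + hi) / 2 + 1) hi (by omega) (by omega) hhi ?_ p2
        intro j hj
        rcases Nat.lt_or_ge j ((lo + hi) / 2) with hj' | hj'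
        · exact Nat.lt_of_lt_of_le (hs j ((lo + hi) / 2) hj' (by omega)) (Nat.le_of_lt hc)
        · have : j = (lo + hi) / 2 := by omega
          subst this; exact hc
      · rw [if_neg hc]
        refine ih lo ((lo + hi) / 2) (by omega) (by omega) (by omega) p1 ?_
        intro j hj hjl
        rcases Nat.eq_or_lt_of_le hj with rfl | hlt
        · omega
        · exact le_of_lt (Nat.lt_of_le_of_lt (by omega) (hs ((lo + hi) / 2) j hlt hjl))
    · rw [if_neg h]
      exact ⟨p1, fun j hj hjl => p2 j (by omega) hjl, by omega⟩

lemma step_eq (a : List String) (tok : String) (idx : Nat) :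
    (if lowB (posFrom a tok 0) idx (posFrom a tok 0).length 0 (posFrom a tok 0).length = (posFrom a tok 0).length
     then none
     else some ((posFrom a tok 0).getD (lowB (posFrom a tok 0) idx (posFrom a tok 0).length 0 (posFrom a tok 0).length) 0))
    = scanA tok (a.drop idx) idx := by
  set lst := posFrom a tok 0 with hlst
  have hs : ∀ p q, p < q → q < lst.length → lst.getD p 0 < lst.getD q 0 := by
    intro p q hpq hq
    have hp : p < lst.length := lt_trans hpq hq
    rw [List.getD_eq_getElem lst 0 hp, List.getD_eq_getElem lst 0 hq]
    exact (List.pairwise_iff_getElem.1 (posFrom_sorted tok a 0)) p q hp hq hpq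
  obtain ⟨c1, c2, c3⟩ := lowB_spec lst idx hs lst.length 0 lst.length (by omega)
    (Nat.zero_le _) le_rfl (by omega) (fun j hj hjl => by omega)
  set r := lowB lst idx lst.length 0 lst.length with hr
  have hmem : ∀ v ∈ lst, v < a.length ∧ a.getD v "" = tok := by
    intro v hv
    rcases (mem_posFrom tok a 0 v).1 hv with ⟨m, hm, hveq, hg⟩
    have : v = m := by omega
    subst this; exact ⟨hm, hg⟩
  cases hscan : scanA tok (a.drop idx) idx with
  | none =>
    have hnone := scanA_none tok a (a.drop idx) idx rfl hscan
    have hrl : r = lst.length := by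
      by_contra hne
      have hrlt : r < lst.length := lt_of_le_of_ne c3 hne
      have h1 : idx ≤ lst.getD r 0 := c2 r le_rfl hrlt
      have hm : lst.getD r 0 ∈ lst := by
        rw [List.getD_eq_getElem lst 0 hrlt]; exact List.getElem_mem hrlt
      rcases hmem _ hm with ⟨hv1, hv2⟩
      exact hnone _ h1 hv1 hv2
    simp [hrl]
  | some i =>
    obtain ⟨h1, h2, h3, h4⟩ := scanA_some tok a (a.drop idx) idx i rfl hscan
    have hi_mem : i ∈ lst := (mem_posFrom tok a 0 i).2 ⟨i, h2, by omega, h3⟩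
    rcases List.mem_iff_getElem.1 hi_mem with ⟨j, hjl, hje⟩
    have hjD : lst.getD j 0 = i := by rw [List.getD_eq_getElem lst 0 hjl, hje]
    have hrj : r ≤ j := by
      by_contra hc
      have := c1 j (by omega)
      omega
    have hrlt : r < lst.length := lt_of_le_of_lt hrj hjl
    have hge : idx ≤ lst.getD r 0 := c2 r le_rfl hrlt
    have hmr : lst.getD r 0 ∈ lst := by
      rw [List.getD_eq_getElem lst 0 hrlt]; exact List.getElem_mem hrlt
    rcases hmem _ hmr with ⟨hv1, hv2⟩
    have hile : i ≤ lst.getD r 0 := by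
      by_contra hc
      exact h4 _ hge (by omega) hv2
    have hler : lst.getD r 0 ≤ i := by
      rcases Nat.eq_or_lt_of_le hrj with rfl | hlt
      · omega
      · have := hs r j hlt hjl; omega
    have heq : lst.getD r 0 = i := le_antisymm hler hile
    rw [if_neg (by omega), heq]

lemma uttAB (a : List String) : ∀ (u : List String) (idx : Nat),
    uttB (buildPos a 0 PySem.Dict.empty) u idx = uttA a u idx := by
  intro u
  induction u with
  | nil => intro idx; rfl
  | cons t ts ih =>
    intro idx
    have hd : (buildPos a 0 PySem.Dict.empty).getD t [] = posFrom a t 0 := by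
      rw [getD_buildPos]; simp [PySem.Dict.getD_empty]
    have hstep := step_eq a t idx
    simp only [uttA, uttB, hd]
    cases hscan : scanA t (a.drop idx) idx with
    | none =>
      rw [hscan] at hstep
      by_cases hcond : lowB (posFrom a t 0) idx (posFrom a t 0).length 0 (posFrom a t 0).length = (posFrom a t 0).length
      · simp [hcond, ih]
      · rw [if_neg hcond] at hstep; simp at hstep
    | some i =>
      rw [hscan] at hstep
      by_cases hcond : lowB (posFrom a t 0) idx (posFrom a t 0).length 0 (posFrom a t 0).length = (posFrom a t 0).length
      · rw [if_pos hcond] at hstep; simp at hstep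
      · rw [if_neg hcond] at hstep
        simp only [Option.some.injEq] at hstep
        rw [List.getD_eq_getElem?_getD] at hstep
        simp [hcond, hstep, ih]

lemma mapsAB (a : List String) : ∀ (us : List (List String)) (idx : Nat),
    mapsB (buildPos a 0 PySem.Dict.empty) us idx = mapsA a us idx := by
  intro us
  induction us with
  | nil => intro idx; simp [mapsA, mapsB]
  | cons u us ih =>
    intro idx
    simp only [mapsA, mapsB, uttAB, ih]

-- ===== VERDICT (by name: the statement is the Claim_ definition above) =====
theorem target_to_align4d_spec : Claim_equal_target_to_align4d := by
  intro t a _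
  unfold Spec_target_to_align4d target_to_align4d target_to_align4d_alt
  rw [mapsAB]
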